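-- pv_equiv track=rewrite | github.com/p261760572/nontax2 | utils.py | parse_sql_bind
-- ===== SOURCE A (Python) =====
-- _TK_ILLEGAL = 0
--
-- _TK_OTHER = 1
--
-- _TK_STRING = 2
--
-- _TK_BIND_VAR = 3
--
-- def _get_token(sql, sql_len, start):
--     i = start
--
--     if sql[i] == "'":
--         i += 1
--         while i < sql_len:
--             if sql[i] != "'":
--                 i += 1
--             elif sql[i:i + 2] == "''":
--                 i += 2
--             else:
--                 i += 1  # if sql[i] == "'"
--                 return i - start, _TK_STRING
--         return i - start, _TK_ILLEGAL
--     elif sql[i] == ":":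
--         i += 1
--         while i < sql_len and (sql[i].isalnum() or sql[i] == "_"):
--             i += 1
--         token_len = i - start
--         if token_len > 1:
--             return token_len, _TK_BIND_VAR
--         return token_len, _TK_ILLEGAL
--     else:
--         while i < sql_len and sql[i] not in ("'", ":"):
--             i += 1
--         return i - start, _TK_OTHER
--
-- def parse_sql_bind(sql):
--     """
--     解析SQL的绑定变量名称
--     :param sql:
--     :return:
--     """
--     bind = []
--     sql_len = len(sql)
--     i = 0
--     while i < sql_len:
--         token_len, token_type = _get_token(sql, sql_len, i)
--         if token_type == _TK_ILLEGAL: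
--             raise SyntaxError("解析SQL出错:%s" % sql)
--
--         token = sql[i:i + token_len]
--         if token_type == _TK_BIND_VAR:
--             name = token[1:]
--             bind.append(name)
--         i = i + token_len
--
--     return bind
-- ===== SOURCE B (Python) =====
-- def parse_sql_bind(sql):
--     """
--     Flat single-pass scanner with inline modes: bind names are accumulated
--     character by character while scanning; no token lengths, no re-slicing.
--     """
--     bind = []
--     n = len(sql)
--     i = 0
--     while i < n:
--         c = sql[i]
--         if c == "'":
--             i += 1
--             while True:
--                 if i >= n:
--                     raise SyntaxError("解析SQL出错:%s" % sql)
--                 if sql[i] != "'":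
--                     i += 1
--                 elif i + 1 < n and sql[i + 1] == "'":
--                     i += 2
--                 else:
--                     i += 1
--                     break
--         elif c == ":":
--             i += 1
--             name = []
--             while i < n and (sql[i].isalnum() or sql[i] == "_"):
--                 name.append(sql[i])
--                 i += 1
--             if not name:
--                 raise SyntaxError("解析SQL出错:%s" % sql)
--             bind.append("".join(name))
--         else:
--             i += 1
--     return bind
-- ===== Notes on version B (the rewrite author's own statement) =====
-- stated objective: alternative
-- what changed: Replaced the length-returning tokenizer helper (_get_token) plus token re-slicing with one flat scanner that keeps an explicit position, consumes string literals and ordinary characters inline, and accumulates each bind name character by character while reading it, never computing token lengths or slicing tokens.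
import Mathlib
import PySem

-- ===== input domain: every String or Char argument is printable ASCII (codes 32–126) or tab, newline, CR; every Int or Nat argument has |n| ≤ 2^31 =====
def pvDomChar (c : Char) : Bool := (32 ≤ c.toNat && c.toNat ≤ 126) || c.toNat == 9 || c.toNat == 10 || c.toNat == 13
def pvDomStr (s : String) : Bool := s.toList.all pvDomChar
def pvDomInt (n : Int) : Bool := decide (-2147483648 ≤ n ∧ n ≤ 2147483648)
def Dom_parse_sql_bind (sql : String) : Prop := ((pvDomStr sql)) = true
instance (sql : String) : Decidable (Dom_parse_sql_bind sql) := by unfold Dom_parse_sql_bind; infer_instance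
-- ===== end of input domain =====

-- B replaces A's length-returning tokenizer (_get_token + re-slicing) by one flat scanner that
-- accumulates bind names character by character — a different decomposition (objective:
-- alternative); Pre_ excludes the inputs on which A raises SyntaxError (B raises there too).

-- c.isalnum() or c == "_"  (PySem.Chars.isalnum is exact on the ASCII domain)
def pvIsWord (c : Char) : Bool := PySem.Chars.isalnum c || c = '_'

-- ===== PORT A =====
-- The index i into sql is represented by the suffix of sql.toList starting at i;
-- token lengths are the Nat lengths A computes.

-- A's string branch of _get_token: chars consumed after the opening quote (incl. the closing
-- quote); none = the while loop ran off the end (the _TK_ILLEGAL return).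
def aGetTokenStr : List Char → Option Nat
  | [] => none
  | c :: rest =>
    if c ≠ '\'' then (aGetTokenStr rest).map (· + 1)
    else
      match rest with
      | d :: r2 => if d = '\'' then (aGetTokenStr r2).map (· + 2) else some 1
      | [] => some 1

-- A's bind-variable branch: length of the run of word characters after the colon
def aGetTokenWord : List Char → Nat
  | [] => 0
  | c :: rest => if pvIsWord c then aGetTokenWord rest + 1 else 0

-- A's "other" branch: length of the run of characters not in ("'", ":")
def aGetTokenOther : List Char → Nat
  | [] => 0
  | c :: rest => if c = '\'' || c = ':' then 0 else aGetTokenOther rest + 1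

-- _get_token: (token_len, token_type) with 0 = _TK_ILLEGAL, 1 = _TK_OTHER, 2 = _TK_STRING, 3 = _TK_BIND_VAR
def aGetToken (cs : List Char) : Nat × Int :=
  match cs with
  | [] => (0, 0)  -- unreachable: the caller only calls with i < sql_len
  | c :: rest =>
    if c = '\'' then
      match aGetTokenStr rest with
      | some k => (1 + k, 2)
      | none => (cs.length, 0)
    else if c = ':' then
      let token_len := 1 + aGetTokenWord rest
      if token_len > 1 then (token_len, 3) else (token_len, 0)
    else (aGetTokenOther cs, 1)

theorem aGetToken_fst_pos (c : Char) (rest : List Char)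
    (h : (aGetToken (c :: rest)).2 ≠ 0) : 1 ≤ (aGetToken (c :: rest)).1 := by
  by_cases h1 : c = '\''
  · subst h1
    simp only [aGetToken, reduceIte] at h ⊢
    cases hs : aGetTokenStr rest with
    | some k => simp [hs]
    | none => rw [hs] at h; simp at h
  · by_cases h2 : c = ':'
    · subst h2
      simp only [aGetToken, Char.reduceEq, reduceIte] at h ⊢
      split <;> simp
    · simp only [aGetToken, if_neg h1, if_neg h2] at h ⊢
      rw [aGetTokenOther, if_neg (by simp [h1, h2])]
      omega

-- parse_sql_bind's main loop; the ILLEGAL branch (Python: raise SyntaxError) is excluded by Pre_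
def aLoop (cs : List Char) (bind : List String) : List String :=
  match cs with
  | [] => bind
  | c :: rest =>
    let t := aGetToken (c :: rest)
    if _h : t.2 = 0 then bind  -- raise SyntaxError
    else
      let token := (c :: rest).take t.1
      aLoop ((c :: rest).drop t.1)
        (if t.2 = 3 then bind ++ [String.ofList (token.drop 1)] else bind)
termination_by cs.length
decreasing_by
  have := aGetToken_fst_pos c rest _h
  simp [List.length_drop]; omega

def parse_sql_bind (sql : String) : List String := aLoop sql.toList []

-- ===== PORT B =====
-- B's inner string loop: the suffix after the closing quote; none = Python raises SyntaxError
def bSkipStr : List Char → Option (List Char)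
  | [] => none
  | c :: rest =>
    if c ≠ '\'' then bSkipStr rest
    else
      match rest with
      | d :: r2 => if d = '\'' then bSkipStr r2 else some rest
      | [] => some rest

theorem bSkipStr_length_lt (l rem : List Char) (h : bSkipStr l = some rem) :
    rem.length < l.length := by
  induction l using bSkipStr.induct generalizing rem with
  | case1 => simp [bSkipStr] at h
  | case2 c rest hc ih =>
    rw [bSkipStr.eq_def] at h
    simp only [if_pos hc] at h
    have := ih _ h; simp; omega
  | case3 c hc r2 ih =>
    rw [not_not] at hc; subst hc
    simp only [bSkipStr] at h
    have := ih _ h; simp; omega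
  | case4 c hc d r2 hd =>
    rw [not_not] at hc; subst hc
    simp [bSkipStr, hd] at h
    simp [← h]
  | case5 c hc =>
    rw [not_not] at hc; subst hc
    simp [bSkipStr] at h
    simp [← h]

-- B's name loop: the accumulated name characters and the suffix where the run stops
def bReadName : List Char → List Char → List Char × List Char
  | [], acc => (acc, [])
  | c :: rest, acc => if pvIsWord c then bReadName rest (acc ++ [c]) else (acc, c :: rest)

theorem bReadName_snd_le (l acc : List Char) : (bReadName l acc).2.length ≤ l.length := by
  induction l generalizing acc with
  | nil => simp [bReadName]
  | cons c rest ih =>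
    rw [bReadName]
    split
    · exact le_trans (ih _) (by simp)
    · simp

-- B's outer loop; the two SyntaxError exits are excluded by Pre_
def bScan (cs : List Char) (bind : List String) : List String :=
  match cs with
  | [] => bind
  | c :: rest =>
    if c = '\'' then
      match hs : bSkipStr rest with
      | some rem => bScan rem bind
      | none => bind  -- raise SyntaxError
    else if c = ':' then
      let nr := bReadName rest []
      if nr.1 = [] then bind  -- raise SyntaxError
      else bScan nr.2 (bind ++ [String.ofList nr.1])
    else bScan rest bind
termination_by cs.length
decreasing_by
  · have := bSkipStr_length_lt rest rem hs; simp; omega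
  · have := bReadName_snd_le rest []; simp; omega
  · simp

def parse_sql_bind_alt (sql : String) : List String := bScan sql.toList []

-- ===== PRECONDITION & SPEC =====
-- Grammar of the inputs on which the Python A returns (no SyntaxError): every quoted string
-- literal is terminated (with '' as an escaped quote, equivalently close-then-reopen) and every
-- ':' outside a string literal is followed by a character satisfying c.isalnum() or c == "_".
-- Checked by a 3-state automaton: mode 0 = normal, 1 = inside a string literal, 3 = just after a colon.
def pvWfAux : Nat → List Char → Bool
  | 0, [] => true
  | 0, c :: rest =>
    if c = '\'' then pvWfAux 1 rest
    else if c = ':' then pvWfAux 3 rest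
    else pvWfAux 0 rest
  | 1, [] => false
  | 1, c :: rest => if c = '\'' then pvWfAux 0 rest else pvWfAux 1 rest
  | 3, [] => false
  | 3, c :: rest => if pvIsWord c then pvWfAux 0 rest else false
  | _, _ => false

def Pre_parse_sql_bind (sql : String) : Prop := pvWfAux 0 sql.toList = true
instance (sql : String) : Decidable (Pre_parse_sql_bind sql) := by unfold Pre_parse_sql_bind; infer_instance

def pvWitness_parse_sql_bind : String := "select * from t where a = :name and b = 'x''y'"

def Spec_parse_sql_bind (sql : String) (out : List String) : Prop := out = parse_sql_bind_alt sql
instance (sql : String) (out : List String) : Decidable (Spec_parse_sql_bind sql out) := by unfold Spec_parse_sql_bind; infer_instance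

-- ===== CLAIM (what is proved, stated in full; the proofs are below) =====
def Claim_equal_parse_sql_bind : Prop := ∀ (sql : String), Dom_parse_sql_bind sql → Pre_parse_sql_bind sql → Spec_parse_sql_bind sql (parse_sql_bind sql)

-- ===== LEMMAS AND PROOFS =====

-- unfolding lemmas for the well-formedness automaton
theorem pvWf_quote (rest : List Char) : pvWfAux 0 ('\'' :: rest) = pvWfAux 1 rest := by
  simp [pvWfAux]

theorem pvWf_other (c : Char) (rest : List Char) (h1 : c ≠ '\'') (h2 : c ≠ ':') :
    pvWfAux 0 (c :: rest) = pvWfAux 0 rest := by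
  simp [pvWfAux, h1, h2]

theorem pvWfStr_quote (rest : List Char) : pvWfAux 1 ('\'' :: rest) = pvWfAux 0 rest := by
  simp [pvWfAux]

theorem pvWfStr_other (c : Char) (rest : List Char) (h1 : c ≠ '\'') :
    pvWfAux 1 (c :: rest) = pvWfAux 1 rest := by
  simp [pvWfAux, h1]

-- a word character is neither a quote nor a colon
theorem pvIsWord_not_special (c : Char) (h : pvIsWord c = true) : c ≠ '\'' ∧ c ≠ ':' := by
  constructor <;> rintro rfl <;> revert h <;> decide

theorem pvWf_colon (d : Char) (r2 : List Char) :
    pvWfAux 0 (':' :: d :: r2) = (pvIsWord d && pvWfAux 0 (d :: r2)) := by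
  have h1 : pvWfAux 0 (':' :: d :: r2) = pvWfAux 3 (d :: r2) := by simp [pvWfAux]
  rw [h1]
  by_cases hw : pvIsWord d
  · obtain ⟨hq, hcol⟩ := pvIsWord_not_special d hw
    rw [pvWf_other d r2 hq hcol]
    simp [pvWfAux, hw]
  · simp [pvWfAux, hw]

-- a scanned string literal: A returns its length, B drops exactly it
theorem skipStr_eq_drop (l : List Char) (k : Nat) (h : aGetTokenStr l = some k) :
    bSkipStr l = some (l.drop k) := by
  induction l using aGetTokenStr.induct generalizing k with
  | case1 => simp [aGetTokenStr] at h
  | case2 c rest hc ih =>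
    rw [aGetTokenStr.eq_def] at h
    rw [bSkipStr.eq_def]
    simp only [if_pos hc] at h ⊢
    cases hs : aGetTokenStr rest with
    | none => simp [hs] at h
    | some k' =>
      simp only [hs, Option.map_some, Option.some.injEq] at h
      subst h
      rw [ih k' hs]
      simp
  | case3 c hc r2 ih =>
    rw [not_not] at hc; subst hc
    simp only [aGetTokenStr] at h
    cases hs : aGetTokenStr r2 with
    | none => simp [hs] at h
    | some k' =>
      simp [hs] at h
      have hk : k = k' + 2 := by omega
      subst hk
      simp only [bSkipStr]
      rw [ih k' hs]
      simp
  | case4 c hc d r2 hd =>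
    rw [not_not] at hc; subst hc
    simp [aGetTokenStr, hd] at h
    have hk : k = 1 := by omega
    subst hk
    simp [bSkipStr, hd]
  | case5 c hc =>
    rw [not_not] at hc; subst hc
    simp [aGetTokenStr] at h
    have hk : k = 1 := by omega
    subst hk
    simp [bSkipStr]

-- a well-formed string literal: A's scanner succeeds and the remainder stays well-formed
theorem wfStr_scan (l : List Char) (h : pvWfAux 1 l = true) :
    ∃ k, aGetTokenStr l = some k ∧ pvWfAux 0 (l.drop k) = true := by
  induction l using aGetTokenStr.induct with
  | case1 => simp [pvWfAux] at h
  | case2 c rest hc ih =>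
    rw [pvWfStr_other c rest hc] at h
    obtain ⟨k, hk, hwf⟩ := ih h
    refine ⟨k + 1, ?_, by simpa using hwf⟩
    rw [aGetTokenStr.eq_def]
    simp only [if_pos hc, hk]
    rfl
  | case3 c hc r2 ih =>
    rw [not_not] at hc; subst hc
    rw [pvWfStr_quote, pvWf_quote] at h
    obtain ⟨k, hk, hwf⟩ := ih h
    refine ⟨k + 2, ?_, by simpa using hwf⟩
    simp [aGetTokenStr, hk]
  | case4 c hc d r2 hd =>
    rw [not_not] at hc; subst hc
    rw [pvWfStr_quote] at h
    refine ⟨1, ?_, by simpa using h⟩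
    simp [aGetTokenStr, hd]
  | case5 c hc =>
    rw [not_not] at hc; subst hc
    refine ⟨1, ?_, by simp [pvWfAux]⟩
    simp [aGetTokenStr]

-- B's name loop returns exactly the word run A measures, and the suffix after it
theorem readName_eq (l acc : List Char) :
    bReadName l acc = (acc ++ l.take (aGetTokenWord l), l.drop (aGetTokenWord l)) := by
  induction l generalizing acc with
  | nil => simp [bReadName, aGetTokenWord]
  | cons c rest ih =>
    rw [bReadName, aGetTokenWord]
    split
    · rw [ih]; simp
    · simp

-- dropping a word run preserves well-formedness
theorem wf_drop_word (l : List Char) (h : pvWfAux 0 l = true) :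
    pvWfAux 0 (l.drop (aGetTokenWord l)) = true := by
  induction l with
  | nil => simpa using h
  | cons c rest ih =>
    rw [aGetTokenWord]
    split
    · rename_i hw
      obtain ⟨h1, h2⟩ := pvIsWord_not_special c hw
      rw [pvWf_other c rest h1 h2] at h
      simpa using ih h
    · simpa using h

-- dropping an "other" run preserves well-formedness
theorem wf_drop_other (l : List Char) (h : pvWfAux 0 l = true) :
    pvWfAux 0 (l.drop (aGetTokenOther l)) = true := by
  induction l with
  | nil => simpa using h
  | cons c rest ih =>
    rw [aGetTokenOther]
    split
    · simpa using h
    · rename_i hns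
      simp only [Bool.or_eq_true, decide_eq_true_eq, not_or] at hns
      rw [pvWf_other c rest hns.1 hns.2] at h
      simpa using ih h

-- B walks an "other" run one character at a time
theorem bScan_drop_other (l : List Char) (bind : List String) :
    bScan l bind = bScan (l.drop (aGetTokenOther l)) bind := by
  induction l generalizing bind with
  | nil => simp
  | cons c rest ih =>
    rw [aGetTokenOther]
    split
    · simp
    · rename_i hns
      simp only [Bool.or_eq_true, decide_eq_true_eq, not_or] at hns
      rw [bScan.eq_def]
      simp only [if_neg hns.1, if_neg hns.2]
      simpa using ih bind

-- main equivalence: on well-formed input A's token loop equals B's flat scan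
theorem aLoop_eq_bScan_aux : ∀ (n : Nat) (cs : List Char) (bind : List String),
    cs.length = n → pvWfAux 0 cs = true → aLoop cs bind = bScan cs bind := by
  intro n
  induction n using Nat.strong_induction_on with
  | _ n ih =>
    rintro cs bind rfl h
    cases cs with
    | nil => simp [aLoop, bScan]
    | cons c rest =>
      by_cases hc : c = '\''
      · subst hc
        rw [pvWf_quote] at h
        obtain ⟨k, hk, hwf⟩ := wfStr_scan rest h
        have hskip := skipStr_eq_drop rest k hk
        rw [aLoop]
        have ht : aGetToken ('\'' :: rest) = (1 + k, 2) := by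
          simp [aGetToken, hk]
        rw [ht]
        rw [dif_neg (show ¬((1 + k, (2:Int)).2 = 0) by simp)]
        dsimp only
        simp only [Int.reduceEq, reduceIte]
        have hlt : (rest.drop k).length < (('\'' :: rest) : List Char).length := by
          simp only [List.length_drop, List.length_cons]; omega
        have hrec := ih _ hlt (rest.drop k) bind rfl hwf
        rw [bScan.eq_def]
        simp only [Char.reduceEq, reduceIte]
        split
        · rename_i rem hsome
          rw [hskip] at hsome
          injection hsome with hrem
          subst hrem
          rw [show (1 + k) = k + 1 by omega, List.drop_succ_cons]
          exact hrec
        · rename_i hnone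
          rw [hnone] at hskip
          exact absurd hskip (by simp)
      · by_cases hcol : c = ':'
        · subst hcol
          cases rest with
          | nil => simp [pvWfAux] at h
          | cons d r2 =>
            rw [pvWf_colon] at h
            simp only [Bool.and_eq_true] at h
            obtain ⟨hd, hwfrest⟩ := h
            set w := aGetTokenWord (d :: r2) with hw
            have hw1 : 1 ≤ w := by
              rw [hw, aGetTokenWord, if_pos hd]; omega
            have ht : aGetToken (':' :: d :: r2) = (1 + w, 3) := by
              simp only [aGetToken, Char.reduceEq, reduceIte]
              rw [if_pos (by omega), ← hw]
            rw [aLoop, ht]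
            rw [dif_neg (show ¬((1 + w, (3:Int)).2 = 0) by simp)]
            dsimp only
            simp only [Int.reduceEq, reduceIte]
            have hwf' : pvWfAux 0 ((d :: r2).drop w) = true := by
              rw [hw]; exact wf_drop_word _ hwfrest
            have hlt : ((d :: r2).drop w).length < ((':' :: d :: r2) : List Char).length := by
              simp only [List.length_drop, List.length_cons]; omega
            have hstep := ih _ hlt ((d :: r2).drop w)
              (bind ++ [String.ofList ((d :: r2).take w)]) rfl hwf'
            rw [bScan.eq_def]
            simp only [Char.reduceEq, reduceIte, readName_eq, List.nil_append, ← hw]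
            have htake_ne : (d :: r2).take w ≠ [] := by
              cases hwc : (d :: r2).take w with
              | nil => exfalso; have := congrArg List.length hwc; simp at this; omega
              | cons _ _ => simp
            rw [if_neg htake_ne]
            simp only [show 1 + w = w + 1 from by omega, List.drop_succ_cons,
              List.take_succ_cons, List.drop_one, List.tail_cons]
            exact hstep
        · -- token type _TK_OTHER
          rw [pvWf_other c rest hc hcol] at h
          have hns : ¬(c = '\'' || c = ':') = true := by simp [hc, hcol]
          set m := aGetTokenOther (c :: rest) with hm
          have hm1 : 1 ≤ m := by
            rw [hm, aGetTokenOther, if_neg hns]; omega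
          have ht : aGetToken (c :: rest) = (m, 1) := by
            simp only [aGetToken, if_neg hc, if_neg hcol]
            rw [hm]
          rw [aLoop, ht]
          rw [dif_neg (show ¬((m, (1:Int)).2 = 0) by simp)]
          dsimp only
          simp only [Int.reduceEq, reduceIte]
          have hwfc : pvWfAux 0 (c :: rest) = true := by
            rw [pvWf_other c rest hc hcol]; exact h
          have hwf' : pvWfAux 0 ((c :: rest).drop m) = true := by
            rw [hm]; exact wf_drop_other _ hwfc
          have hlt : ((c :: rest).drop m).length < ((c :: rest) : List Char).length := by
            simp only [List.length_drop, List.length_cons]; omega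
          rw [ih _ hlt ((c :: rest).drop m) bind rfl hwf']
          rw [hm, ← bScan_drop_other]

-- ===== VERDICT (by name: the statement is the Claim_ definition above) =====
theorem parse_sql_bind_spec : Claim_equal_parse_sql_bind := by
  intro sql _ hpre
  unfold Spec_parse_sql_bind parse_sql_bind parse_sql_bind_alt
  exact aLoop_eq_bScan_aux sql.toList.length sql.toList [] rfl hpre
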